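-- pv_equiv track=rewrite | github.com/YangLingSanShan/Code-Check | test_codes/test2/1_更换变量名.py | calculate
-- ===== SOURCE A (Python) =====
-- def calculate(input_str):
--     hash_map = {0: 1}
--
--     MODULO = 1000000007
--     result = 0
--     current = 0
--     for index, char in enumerate(input_str):
--         if char == '1':
--             current -= 1
--         else:
--             current += 1
--
--         result += (len(input_str) - index) * hash_map.get(current, 0)
--         result %= MODULO
--         hash_map[current] = hash_map.get(current, 0) + index + 2
--
--     return result
-- ===== SOURCE B (Python) =====
-- def calculate(input_str):
--     MODULO = 1000000007
--     n = len(input_str)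
--     # prefix balance: p[k] = (#non-'1') - (#'1') among the first k characters
--     p = [0]
--     cur = 0
--     for ch in input_str:
--         cur += -1 if ch == '1' else 1
--         p.append(cur)
--     result = 0
--     for i in range(n):
--         for m in range(i + 1):
--             if p[m] == p[i + 1]:
--                 result = (result + (m + 1) * (n - i)) % MODULO
--     return result
-- ===== Notes on version B (the rewrite author's own statement) =====
-- stated objective: alternative
-- what changed: Replaces the single-pass running-balance hashmap of weighted prefix counts with an explicit prefix-balance array and a double loop over all (start,end) substring pairs, adding (m+1)*(n-i) whenever p[m]==p[i+1].
import Mathlib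
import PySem

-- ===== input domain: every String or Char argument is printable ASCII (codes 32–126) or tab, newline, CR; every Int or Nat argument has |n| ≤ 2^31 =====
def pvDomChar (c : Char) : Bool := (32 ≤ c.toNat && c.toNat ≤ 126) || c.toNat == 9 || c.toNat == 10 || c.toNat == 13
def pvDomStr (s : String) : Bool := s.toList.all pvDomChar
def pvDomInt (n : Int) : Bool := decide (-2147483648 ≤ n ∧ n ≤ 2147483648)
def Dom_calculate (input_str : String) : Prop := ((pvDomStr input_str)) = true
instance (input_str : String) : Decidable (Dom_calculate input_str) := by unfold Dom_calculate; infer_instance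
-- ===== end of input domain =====

-- B replaces A's one-pass hashmap of weighted prefix-balance counts by an explicit
-- prefix-balance array and an O(n^2) double loop over substring endpoints (alternative
-- decomposition, not faster); same return value on every input.


-- ===== PORT A =====
-- `%` here is Lean's Int.emod: exact for Python `%` because the modulus 1000000007 is positive.
def calculate (input_str : String) : Int :=
  let cs := input_str.toList
  let MODULO : Int := 1000000007
  let st := (PySem.List.enumerate cs).foldl
    (fun (st : PySem.Dict Int Int × Int × Int) (ic : Int × Char) =>
      let hm := st.1
      let result := st.2.1
      let current := st.2.2
      let current := if ic.2 = '1' then current - 1 else current + 1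
      let result := (result + ((cs.length : Int) - ic.1) * hm.getD current 0) % MODULO
      let hm := hm.insert current (hm.getD current 0 + ic.1 + 2)
      (hm, result, current))
    ((PySem.Dict.empty).insert 0 1, 0, 0)
  st.2.1

-- ===== PORT B =====
-- range(n) / range(i+1): nonnegative bounds, so List.range is exact here;
-- p[m] and p[i+1] are always in range in Source B, ported as getD with default 0.
def calculate_alt (input_str : String) : Int :=
  let cs := input_str.toList
  let n := cs.length
  let MODULO : Int := 1000000007
  let pc := cs.foldl
    (fun (st : List Int × Int) c =>
      let cur := st.2 + (if c = '1' then (-1 : Int) else 1)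
      (st.1 ++ [cur], cur))
    ([0], 0)
  let p := pc.1
  (List.range n).foldl
    (fun result i =>
      (List.range (i + 1)).foldl
        (fun result m =>
          if p.getD m 0 = p.getD (i + 1) 0 then
            (result + ((m : Int) + 1) * ((n : Int) - (i : Int))) % MODULO
          else result)
        result)
    0

-- ===== PRECONDITION & SPEC =====
def Spec_calculate (input_str : String) (out : Int) : Prop := out = calculate_alt input_str
instance (input_str : String) (out : Int) : Decidable (Spec_calculate input_str out) := by unfold Spec_calculate; infer_instance

-- ===== CLAIM (what is proved, stated in full; the proofs are below) =====
def Claim_equal_calculate : Prop := ∀ (input_str : String), Dom_calculate input_str → Spec_calculate input_str (calculate input_str)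

-- ===== LEMMAS AND PROOFS =====

-- pvStep c: the per-character balance increment (+1 for non-'1', -1 for '1')
def pvStep (c : Char) : Int := if c = '1' then -1 else 1

-- pvQ cs k: the prefix balance after the first k characters
def pvQ (cs : List Char) (k : Nat) : Int := ((cs.take k).map pvStep).sum

-- pvScan cs cur: the running prefix balances starting from cur (B's array tail)
def pvScan : List Char → Int → List Int
  | [], _ => []
  | c :: t, cur => (cur + pvStep c) :: pvScan t (cur + pvStep c)

-- B's prefix-building fold, named so the port's lambda is definitionally equal to it
def pvFP (st : List Int × Int) (c : Char) : List Int × Int :=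
  let cur := st.2 + (if c = '1' then (-1 : Int) else 1)
  (st.1 ++ [cur], cur)

-- pvInner cs i: the total weight contributed by end index i (the common quantity)
def pvInner (cs : List Char) (i : Nat) : Int :=
  ((List.range (i + 1)).map
    (fun m => if pvQ cs m = pvQ cs (i + 1) then ((m : Int) + 1) * ((cs.length : Int) - (i : Int)) else 0)).sum

-- B's inner and outer loop bodies, named for definitional equality with the port
def pvFI (n : Nat) (p : List Int) (i : Nat) (result : Int) (m : Nat) : Int :=
  if p.getD m 0 = p.getD (i + 1) 0 then
    (result + ((m : Int) + 1) * ((n : Int) - (i : Int))) % 1000000007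
  else result

def pvFO (n : Nat) (p : List Int) (result : Int) (i : Nat) : Int :=
  (List.range (i + 1)).foldl (pvFI n p i) result

-- A's loop body, named for definitional equality with the port
def pvFA (cs : List Char) (st : PySem.Dict Int Int × Int × Int) (ic : Int × Char) :
    PySem.Dict Int Int × Int × Int :=
  let hm := st.1
  let result := st.2.1
  let current := st.2.2
  let current := if ic.2 = '1' then current - 1 else current + 1
  let result := (result + ((cs.length : Int) - ic.1) * hm.getD current 0) % 1000000007
  let hm := hm.insert current (hm.getD current 0 + ic.1 + 2)
  (hm, result, current)

-- pvCnt cs j v: A's hashmap content — total weight m+1 of prefixes m ≤ j with balance v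
def pvCnt (cs : List Char) (j : Nat) (v : Int) : Int :=
  ((List.range (j + 1)).map (fun m => if pvQ cs m = v then (m : Int) + 1 else 0)).sum

-- pvR cs j: A's result after j loop iterations
def pvR (cs : List Char) (j : Nat) : Int :=
  ((List.range j).map (pvInner cs)).sum % 1000000007

theorem pvQ_zero (cs : List Char) : pvQ cs 0 = 0 := rfl

theorem pvQ_cons (c : Char) (t : List Char) (k : Nat) :
    pvQ (c :: t) (k + 1) = pvStep c + pvQ t k := by
  simp [pvQ]

theorem pvQ_succ (cs : List Char) (j : Nat) (hj : j < cs.length) :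
    pvQ cs (j + 1) = pvQ cs j + pvStep cs[j] := by
  unfold pvQ
  rw [List.map_take, List.map_take, List.sum_take_succ (List.map pvStep cs) j (by simpa using hj)]
  simp

theorem pvScan_fold : ∀ (t : List Char) (acc : List Int) (cur : Int),
    t.foldl pvFP (acc, cur) = (acc ++ pvScan t cur, cur + (t.map pvStep).sum)
  | [], acc, cur => by simp [pvScan]
  | c :: t, acc, cur => by
    simp only [List.foldl_cons, pvScan, List.map_cons, List.sum_cons]
    have : pvFP (acc, cur) c = (acc ++ [cur + pvStep c], cur + pvStep c) := by
      simp [pvFP, pvStep]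
    rw [this, pvScan_fold t (acc ++ [cur + pvStep c]) (cur + pvStep c)]
    simp [add_assoc]

theorem pvScan_getD : ∀ (t : List Char) (cur : Int) (k : Nat), k < t.length →
    (pvScan t cur).getD k 0 = cur + pvQ t (k + 1)
  | c :: t, cur, 0, _ => by simp [pvScan, pvQ_cons, pvQ_zero]
  | c :: t, cur, k + 1, h => by
    simp only [pvScan, List.getD_cons_succ]
    rw [pvScan_getD t (cur + pvStep c) k (by simpa using h), pvQ_cons]
    ring

theorem pvP_getD (cs : List Char) (m : Nat) (hm : m ≤ cs.length) :
    (0 :: pvScan cs 0).getD m 0 = pvQ cs m := by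
  cases m with
  | zero => simp [pvQ_zero]
  | succ k =>
    simp only [List.getD_cons_succ]
    rw [pvScan_getD cs 0 k (by omega)]
    ring

theorem pvFI_fold (cs : List Char) (i : Nat) (hi : i < cs.length) :
    ∀ (l : List Nat), (∀ m ∈ l, m ≤ cs.length) → ∀ S : Int,
    l.foldl (pvFI cs.length (0 :: pvScan cs 0) i) (S % 1000000007)
    = (S + (l.map fun m => if pvQ cs m = pvQ cs (i + 1) then ((m : Int) + 1) * ((cs.length : Int) - (i : Int)) else 0).sum) % 1000000007
  | [], _, S => by simp
  | m :: t, hl, S => by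
    have hm : m ≤ cs.length := hl m (by simp)
    have step : pvFI cs.length (0 :: pvScan cs 0) i (S % 1000000007) m
        = if pvQ cs m = pvQ cs (i + 1) then
            (S + ((m : Int) + 1) * ((cs.length : Int) - (i : Int))) % 1000000007
          else S % 1000000007 := by
      rw [pvFI, pvP_getD cs m hm, pvP_getD cs (i + 1) (by omega)]
      split_ifs with h
      · rw [Int.emod_add_emod]
      · rfl
    rw [List.foldl_cons, step]
    by_cases h : pvQ cs m = pvQ cs (i + 1)
    · rw [if_pos h, pvFI_fold cs i hi t (fun x hx => hl x (by simp [hx])) (S + ((m : Int) + 1) * ((cs.length : Int) - (i : Int)))]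
      simp [h, add_assoc]
    · rw [if_neg h, pvFI_fold cs i hi t (fun x hx => hl x (by simp [hx])) S]
      simp [h]

theorem pvFO_fold (cs : List Char) :
    ∀ (l : List Nat), (∀ i ∈ l, i < cs.length) → ∀ S : Int,
    l.foldl (pvFO cs.length (0 :: pvScan cs 0)) (S % 1000000007)
    = (S + (l.map (pvInner cs)).sum) % 1000000007
  | [], _, S => by simp
  | i :: t, hl, S => by
    have hi : i < cs.length := hl i (by simp)
    rw [List.foldl_cons, pvFO,
      pvFI_fold cs i hi (List.range (i + 1)) (fun m hm => by
        have := List.mem_range.mp hm; omega) S]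
    rw [show (S +
          (List.map (fun m => if pvQ cs m = pvQ cs (i + 1) then ((m:Int) + 1) * ((cs.length:Int) - (i:Int)) else 0)
              (List.range (i + 1))).sum) = S + pvInner cs i from rfl]
    rw [pvFO_fold cs t (fun x hx => hl x (by simp [hx])) (S + pvInner cs i)]
    simp [pvInner, add_assoc]

theorem pvCnt_succ (cs : List Char) (j : Nat) (v : Int) :
    pvCnt cs (j + 1) v = pvCnt cs j v + (if pvQ cs (j + 1) = v then (j : Int) + 2 else 0) := by
  unfold pvCnt
  rw [List.range_succ]
  simp only [List.map_append, List.sum_append, List.map_cons, List.map_nil, List.sum_cons,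
    List.sum_nil]
  split_ifs with h <;> push_cast <;> ring

theorem pvMulSum (q : Nat → Int) (v c : Int) :
    ∀ l : List Nat,
    c * ((l.map fun m => if q m = v then (m : Int) + 1 else 0).sum)
    = (l.map fun m => if q m = v then ((m : Int) + 1) * c else 0).sum
  | [] => by simp
  | m :: t => by
    simp only [List.map_cons, List.sum_cons, mul_add, pvMulSum q v c t]
    split_ifs with h <;> ring

theorem pvA_loop (cs : List Char) : ∀ j : Nat, j ≤ cs.length → ∃ hm : PySem.Dict Int Int,
    (PySem.List.enumerate (cs.take j) 0).foldl (pvFA cs) ((PySem.Dict.empty).insert 0 1, 0, 0)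
      = (hm, pvR cs j, pvQ cs j)
    ∧ ∀ v, hm.getD v 0 = pvCnt cs j v
  | 0, _ => by
    refine ⟨(PySem.Dict.empty).insert 0 1, ?_, ?_⟩
    · simp [PySem.List.enumerate_nil, pvR, pvQ_zero]
    · intro v
      rw [PySem.Dict.getD_insert]
      unfold pvCnt
      by_cases h : v = 0 <;> simp [h, pvQ_zero, eq_comm]
  | j + 1, hj1 => by
    have hj : j < cs.length := by omega
    obtain ⟨hm, hfold, hget⟩ := pvA_loop cs j (by omega)
    have htake : cs.take (j + 1) = cs.take j ++ [cs[j]] := by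
      rw [List.take_add_one, List.getElem?_eq_getElem hj]
      rfl
    have hq : pvQ cs (j + 1) = if cs[j] = '1' then pvQ cs j - 1 else pvQ cs j + 1 := by
      rw [pvQ_succ cs j hj, pvStep]
      split_ifs <;> ring
    refine ⟨hm.insert (pvQ cs (j + 1)) (pvCnt cs j (pvQ cs (j + 1)) + (j : Int) + 2), ?_, ?_⟩
    · rw [htake, PySem.List.enumerate_append, List.foldl_append, hfold]
      have hlen : (cs.take j).length = j := by simp [List.length_take, Nat.min_eq_left hj.le]
      rw [hlen, PySem.List.enumerate_cons, PySem.List.enumerate_nil]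
      simp only [List.foldl_cons, List.foldl_nil, zero_add]
      show pvFA cs (hm, pvR cs j, pvQ cs j) ((j : Int), cs[j]) = _
      unfold pvFA
      simp only [← hq]
      rw [hget (pvQ cs (j + 1))]
      have hres : (pvR cs j + ((cs.length : Int) - (j : Int)) * pvCnt cs j (pvQ cs (j + 1))) % 1000000007
          = pvR cs (j + 1) := by
        have hmul : ((cs.length : Int) - (j : Int)) * pvCnt cs j (pvQ cs (j + 1)) = pvInner cs j := by
          unfold pvCnt pvInner
          rw [pvMulSum]
        rw [hmul, pvR, Int.emod_add_emod, pvR, List.range_succ]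
        simp
      rw [hres]
    · intro v
      rw [PySem.Dict.getD_insert, pvCnt_succ cs j v]
      by_cases h : v = pvQ cs (j + 1)
      · rw [if_pos h, if_pos h.symm, h]
        exact add_assoc _ _ _
      · rw [if_neg h, if_neg (fun hh : pvQ cs (j + 1) = v => h hh.symm), hget, add_zero]

-- ===== VERDICT (by name: the statement is the Claim_ definition above) =====
theorem calculate_spec : Claim_equal_calculate := by
  intro s _
  unfold Spec_calculate
  have hA : calculate s
      = ((PySem.List.enumerate s.toList 0).foldl (pvFA s.toList)
          ((PySem.Dict.empty).insert 0 1, 0, 0)).2.1 := rfl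
  have hB : calculate_alt s
      = (List.range s.toList.length).foldl
          (pvFO s.toList.length ((s.toList.foldl pvFP ([0], 0)).1)) 0 := rfl
  obtain ⟨hm, hfold, _⟩ := pvA_loop s.toList s.toList.length le_rfl
  rw [hA, show PySem.List.enumerate s.toList 0
      = PySem.List.enumerate (s.toList.take s.toList.length) 0 by rw [List.take_length]]
  rw [hfold]
  have hp : (s.toList.foldl pvFP ([0], 0)).1 = 0 :: pvScan s.toList 0 := by
    rw [pvScan_fold]
    rfl
  have hout := pvFO_fold s.toList (List.range s.toList.length)
    (fun i hi => List.mem_range.mp hi) 0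
  rw [Int.zero_emod] at hout
  rw [hB, hp, hout, zero_add]
  rfl
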